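-- pv_equiv track=rewrite | github.com/MaloMn/waffle | main.py | check_grid
-- ===== SOURCE A (Python) =====
-- def check_grid(choices, index):
--     for word in choices:
--         if word != '' and choices.count(word) > 1:
--             return False
--
--     output = True
--
--     if index >= 1:
--         output &= choices[1][2] == choices[0][2]
--     if index >= 2:
--         output &= choices[2][2] == choices[0][0]
--     if index >= 3:
--         output &= choices[3][2] == choices[1][4] and choices[3][0] == choices[2][4]
--     if index >= 4:
--         output &= choices[4][2] == choices[0][4] and choices[4][4] == choices[3][4]
--     if index >= 5:
--         output &= choices[5][0] == choices[2][0] and choices[5][2] == choices[1][0] and choices[5][4] == choices[4][0]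
--
--     return output
-- ===== SOURCE B (Python) =====
-- # Duplicate detection by sort-then-adjacent-scan; edge constraints as one flat
-- # table walked with early return on the first broken constraint (no accumulator).
-- EDGES = [
--     (1, (1, 2), (0, 2)),
--     (2, (2, 2), (0, 0)),
--     (3, (3, 2), (1, 4)),
--     (3, (3, 0), (2, 4)),
--     (4, (4, 2), (0, 4)),
--     (4, (4, 4), (3, 4)),
--     (5, (5, 0), (2, 0)),
--     (5, (5, 2), (1, 0)),
--     (5, (5, 4), (4, 0)),
-- ]
--
--
-- def check_grid(choices, index):
--     words = sorted(w for w in choices if w != '')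
--     for a, b in zip(words, words[1:]):
--         if a == b:
--             return False
--     for t, (r1, c1), (r2, c2) in EDGES:
--         if index >= t and choices[r1][c1] != choices[r2][c2]:
--             return False
--     return True
-- ===== Notes on version B (the rewrite author's own statement) =====
-- stated objective: alternative
-- what changed: Duplicates are detected by sorting the non-empty words and scanning adjacent pairs instead of calling list.count inside a loop, and the five hard-coded gated AND-blocks become one flat table of (threshold, cell, cell) edge constraints walked with an early return False at the first broken constraint instead of an accumulated output flag.
import Mathlib
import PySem

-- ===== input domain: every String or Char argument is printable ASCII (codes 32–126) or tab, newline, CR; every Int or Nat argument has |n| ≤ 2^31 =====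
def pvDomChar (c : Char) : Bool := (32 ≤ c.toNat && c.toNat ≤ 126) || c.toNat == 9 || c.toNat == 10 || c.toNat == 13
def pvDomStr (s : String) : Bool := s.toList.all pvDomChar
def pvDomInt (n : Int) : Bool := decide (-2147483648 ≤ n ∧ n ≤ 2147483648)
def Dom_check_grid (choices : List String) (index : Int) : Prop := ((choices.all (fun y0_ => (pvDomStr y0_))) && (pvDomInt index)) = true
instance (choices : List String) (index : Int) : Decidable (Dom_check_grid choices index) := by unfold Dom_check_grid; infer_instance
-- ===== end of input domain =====

-- B detects duplicates by sort-then-adjacent-scan and walks a flat edge-constraint table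
-- with early return on the first failure, instead of A's count() loop and gated AND-blocks
-- with an accumulator (objective: alternative).


-- choices[r][c]; total via defaults — Pre_check_grid guarantees every access is in range
def pvCharAt (choices : List String) (r c : Int) : Char :=
  PySem.List.pyGetD (PySem.List.pyGetD choices r "").toList c ' '

-- ===== PORT A =====
def check_grid (choices : List String) (index : Int) : Bool :=
  -- for word in choices: if word != '' and choices.count(word) > 1: return False
  if choices.any (fun w => w != "" && decide (1 < PySem.List.count choices w)) then false
  else
    let output := true
    let output := if 1 ≤ index then output && (pvCharAt choices 1 2 == pvCharAt choices 0 2) else output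
    let output := if 2 ≤ index then output && (pvCharAt choices 2 2 == pvCharAt choices 0 0) else output
    let output := if 3 ≤ index then output && ((pvCharAt choices 3 2 == pvCharAt choices 1 4) && (pvCharAt choices 3 0 == pvCharAt choices 2 4)) else output
    let output := if 4 ≤ index then output && ((pvCharAt choices 4 2 == pvCharAt choices 0 4) && (pvCharAt choices 4 4 == pvCharAt choices 3 4)) else output
    let output := if 5 ≤ index then output && (((pvCharAt choices 5 0 == pvCharAt choices 2 0) && (pvCharAt choices 5 2 == pvCharAt choices 1 0)) && (pvCharAt choices 5 4 == pvCharAt choices 4 0)) else output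
    output

-- ===== PORT B =====
def pvEdges : List (Int × (Int × Int) × (Int × Int)) :=
  [ (1, (1, 2), (0, 2)),
    (2, (2, 2), (0, 0)),
    (3, (3, 2), (1, 4)),
    (3, (3, 0), (2, 4)),
    (4, (4, 2), (0, 4)),
    (4, (4, 4), (3, 4)),
    (5, (5, 0), (2, 0)),
    (5, (5, 2), (1, 0)),
    (5, (5, 4), (4, 0)) ]

-- for a, b in zip(words, words[1:]): if a == b: return False
def pvAdjDup : List String → Bool
  | a :: b :: rest => if a == b then true else pvAdjDup (b :: rest)
  | _ => false

-- for t, (r1,c1), (r2,c2) in EDGES: if index >= t and choices[r1][c1] != choices[r2][c2]: return False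
def pvWalkEdges (choices : List String) (index : Int) : List (Int × (Int × Int) × (Int × Int)) → Bool
  | [] => true
  | (t, p1, p2) :: rest =>
    if decide (t ≤ index) && (pvCharAt choices p1.1 p1.2 != pvCharAt choices p2.1 p2.2) then false
    else pvWalkEdges choices index rest

def check_grid_alt (choices : List String) (index : Int) : Bool :=
  let words := PySem.List.sorted (choices.filter (fun w => w != "")) (fun x => x) false
  if pvAdjDup words then false
  else pvWalkEdges choices index pvEdges

-- ===== PRECONDITION & SPEC =====
-- position (r,c) readable without IndexError
def pvOk (choices : List String) (r c : Int) : Bool :=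
  decide (PySem.Raise.InRange choices.length r) &&
  decide (PySem.Raise.InRange (PySem.List.pyGetD choices r "").toList.length c)

-- Pre_ excludes exactly the inputs on which A raises IndexError: no duplicate made it return
-- False early, index >= 1, and some character access that A actually performs (respecting
-- Python's lazy 'and') is out of range.
def Pre_check_grid (choices : List String) (index : Int) : Prop :=
  (decide (∃ w ∈ choices, w ≠ "" ∧ 1 < choices.count w) || decide (index < 1) ||
   (pvOk choices 1 2 && pvOk choices 0 2 &&
    (!decide (2 ≤ index) || (pvOk choices 2 2 && pvOk choices 0 0)) &&
    (!decide (3 ≤ index) || (pvOk choices 3 2 && pvOk choices 1 4 &&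
       (!(pvCharAt choices 3 2 == pvCharAt choices 1 4) || (pvOk choices 3 0 && pvOk choices 2 4)))) &&
    (!decide (4 ≤ index) || (pvOk choices 4 2 && pvOk choices 0 4 &&
       (!(pvCharAt choices 4 2 == pvCharAt choices 0 4) || (pvOk choices 4 4 && pvOk choices 3 4)))) &&
    (!decide (5 ≤ index) || (pvOk choices 5 0 && pvOk choices 2 0 &&
       (!(pvCharAt choices 5 0 == pvCharAt choices 2 0) || (pvOk choices 5 2 && pvOk choices 1 0 &&
          (!(pvCharAt choices 5 2 == pvCharAt choices 1 0) || (pvOk choices 5 4 && pvOk choices 4 0)))))))) = true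
instance (choices : List String) (index : Int) : Decidable (Pre_check_grid choices index) := by
  unfold Pre_check_grid; infer_instance

def pvWitness_check_grid : List String × Int := (["abcde", "fgchi"], 1)

def Spec_check_grid (choices : List String) (index : Int) (out : Bool) : Prop := out = check_grid_alt choices index
instance (choices : List String) (index : Int) (out : Bool) : Decidable (Spec_check_grid choices index out) := by unfold Spec_check_grid; infer_instance

-- ===== CLAIM (what is proved, stated in full; the proofs are below) =====
def Claim_equal_check_grid : Prop := ∀ (choices : List String) (index : Int), Dom_check_grid choices index → Pre_check_grid choices index → Spec_check_grid choices index (check_grid choices index)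

-- ===== LEMMAS AND PROOFS =====

-- pvAdjDup finds no adjacent equal pair iff adjacent elements are all distinct
lemma pv_adjDup_eq_false_iff : ∀ (s : List String), pvAdjDup s = false ↔ s.IsChain (· ≠ ·) := by
  intro s
  induction s with
  | nil => simp [pvAdjDup]
  | cons a t ih =>
    cases t with
    | nil => simp [pvAdjDup]
    | cons b r =>
      by_cases h : a = b
      · simp [pvAdjDup, h, List.isChain_cons_cons]
      · simp [pvAdjDup, beq_iff_eq, h, List.isChain_cons_cons, ih]

-- on a ≤-sorted list, adjacent-distinct implies Nodup
lemma pv_nodup_of_sorted_chain_ne : ∀ (s : List String),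
    s.Pairwise (· ≤ ·) → s.IsChain (· ≠ ·) → s.Nodup := by
  intro s
  induction s with
  | nil => intro _ _; simp
  | cons a t ih =>
    intro hp hc
    rcases List.pairwise_cons.mp hp with ⟨hle, hp'⟩
    have hc' : t.IsChain (· ≠ ·) := hc.tail
    have hnd := ih hp' hc'
    refine List.nodup_cons.mpr ⟨?_, hnd⟩
    cases t with
    | nil => simp
    | cons b r =>
      have hab : a ≠ b := (List.isChain_cons_cons.mp hc).1
      have halt : a < b := lt_of_le_of_ne (hle b (by simp)) hab
      intro hmem
      rcases List.mem_cons.mp hmem with h | h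
      · exact hab h
      · -- a ∈ r, but b ≤ every element of r and a < b
        have hble : b ≤ a → False := fun hba => absurd (lt_of_lt_of_le halt hba) (lt_irrefl a)
        have : b ≤ a := by
          rcases List.pairwise_cons.mp hp' with ⟨hble', _⟩
          exact hble' a h
        exact hble this

-- pvAdjDup on sorted(filter) detects exactly a repeated non-empty word
lemma pv_adjDup_sorted_iff_not_nodup (l : List String) :
    pvAdjDup (PySem.List.sorted l (fun x => x) false) = false ↔ l.Nodup := by
  have hperm : (PySem.List.sorted l (fun x => x) false).Perm l := PySem.List.sorted_perm l _ _
  rw [pv_adjDup_eq_false_iff]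
  constructor
  · intro hc
    have hp : (PySem.List.sorted l (fun x => x) false).Pairwise (· ≤ ·) := by
      simpa using PySem.List.sorted_pairwise l (fun x => x)
    exact hperm.nodup_iff.mp (pv_nodup_of_sorted_chain_ne _ hp hc)
  · intro hnd
    exact List.Pairwise.isChain (hperm.nodup_iff.mpr hnd)

-- A's count-based loop fires iff the non-empty words are not all distinct
lemma pv_dup_eq (choices : List String) :
    (choices.any (fun w => w != "" && decide (1 < PySem.List.count choices w))) =
    !(choices.filter (fun w => w != "")).Nodup := by
  rw [Bool.eq_iff_iff]
  simp only [List.any_eq_true, Bool.and_eq_true, bne_iff_ne, ne_eq, decide_eq_true_eq,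
    PySem.List.count_eq, Bool.not_eq_true', Bool.eq_false_iff, ne_eq,
    decide_eq_true_eq]
  constructor
  · rintro ⟨w, hmem, hne, hcnt⟩ hnd
    have hfw : (choices.filter (fun w => w != "")).count w = choices.count w := by
      rw [List.count_filter]; simp [hne]
    have h1 : (choices.filter (fun w => w != "")).count w ≤ 1 :=
      List.nodup_iff_count_le_one.mp hnd w
    omega
  · intro h
    obtain ⟨w, hw⟩ := not_forall.mp (fun hall => h (List.nodup_iff_count_le_one.mpr hall))
    have hcnt : 1 < (choices.filter (fun w => w != "")).count w := by omega
    have hmemf : w ∈ choices.filter (fun w => w != "") :=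
      List.count_pos_iff.mp (by omega)
    have hmem : w ∈ choices := List.mem_of_mem_filter hmemf
    have hne : w ≠ "" := by
      have := List.of_mem_filter hmemf; simpa using this
    refine ⟨w, hmem, hne, ?_⟩
    have hfw : (choices.filter (fun w => w != "")).count w = choices.count w := by
      rw [List.count_filter]; simp [hne]
    omega

-- ===== VERDICT (by name: the statement is the Claim_ definition above) =====
theorem check_grid_spec : Claim_equal_check_grid := by
  intro choices index _hdom _hpre
  unfold Spec_check_grid check_grid check_grid_alt
  by_cases hnd : (choices.filter (fun w => w != "")).Nodup
  case neg =>
    have hA : (choices.any (fun w => w != "" && decide (1 < PySem.List.count choices w))) = true := by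
      rw [pv_dup_eq choices]; simp [hnd]
    have hB : pvAdjDup (PySem.List.sorted (choices.filter (fun w => w != "")) (fun x => x) false) = true := by
      rcases Bool.eq_false_or_eq_true (pvAdjDup (PySem.List.sorted (choices.filter (fun w => w != "")) (fun x => x) false)) with h | h
      · exact h
      · exact absurd ((pv_adjDup_sorted_iff_not_nodup _).mp h) hnd
    rw [hA]
    simp [hB]
  case pos =>
    have hA : (choices.any (fun w => w != "" && decide (1 < PySem.List.count choices w))) = false := by
      rw [pv_dup_eq choices]; simp [hnd]
    have hB : pvAdjDup (PySem.List.sorted (choices.filter (fun w => w != "")) (fun x => x) false) = false :=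
      (pv_adjDup_sorted_iff_not_nodup _).mpr hnd
    simp only [hA, hB, Bool.false_eq_true, if_false]
    by_cases h1 : (1:Int) ≤ index <;>
    by_cases h2 : (2:Int) ≤ index <;>
    by_cases h3 : (3:Int) ≤ index <;>
    by_cases h4 : (4:Int) ≤ index <;>
    by_cases h5 : (5:Int) ≤ index <;>
      simp [pvWalkEdges, pvEdges, h1, h2, h3, h4, h5, Bool.and_assoc, Bool.beq_eq_decide_eq]
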